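-- pv_equiv track=rewrite | github.com/nghiant2710/doc2md | doc2md.py | _doc2md
-- ===== SOURCE A (Python) =====
-- SECTIONS = [
--     'Args:',
--     'Attributes:',
--     'Returns:',
--     'Raises:',
--     'Notes:',
--     'Examples:'
-- ]
--
-- SECTION_NAME = 4
--
-- def unindent(lines):
--     """
--     Remove common indentation from string.
--
--     Unlike doctrim there is no special treatment of the first line.
--
--     """
--     try:
--         # Determine minimum indentation:
--         indent = min(len(line) - len(line.lstrip())
--                      for line in lines if line)
--     except ValueError:
--         return lines
--     else:
--         return [line[indent:] for line in lines]
--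
-- def code_block(lines, language=''):
--     """
--     Mark the code segment for syntax highlighting.
--     """
--     return ['```' + language] + lines + ['```']
--
-- def doctest2md(lines):
--     """
--     Convert the given doctest to a syntax highlighted markdown segment.
--     """
--     is_only_code = True
--     lines = unindent(lines)
--     for line in lines:
--         if not line.startswith('>>> ') and not line.startswith('... ') and line not in ['>>>', '...']:
--             is_only_code = False
--             break
--     if is_only_code:
--         orig = lines
--         lines = []
--         for line in orig:
--             lines.append(line[4:])
--     return lines
--
-- def doc_code_block(lines, language):
--     if language == 'python':
--         lines = doctest2md(lines)
--     return code_block(lines, language)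
--
-- def make_heading(level, title):
--     return '#'*max(level, 1) + ' ' + title
--
-- def _is_class_section(line):
--     line = line.strip()
--     if line in SECTIONS:
--         return SECTION_NAME
--     return 0
--
-- def _doc2md(lines):
--     md = []
--     is_code = False
--     for line in lines:
--         trimmed = line.lstrip()
--         level = _is_class_section(line)
--         if is_code:
--             if line:
--                 code.append(line)
--             else:
--                 is_code = False
--                 md += doc_code_block(code, language)
--                 md += [line]
--         elif trimmed.startswith('>>> '):
--             is_code = True
--             language = 'python'
--             code = [line]
--         elif trimmed.startswith('$ '):
--             is_code = True
--             language = 'bash'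
--             code = [line]
--         elif level > 0:
--             md += [make_heading(level, line)]
--         else:
--             md += [line]
--     if is_code:
--         md += doc_code_block(code, language)
--     return md
-- ===== SOURCE B (Python) =====
-- SECTIONS = [
--     'Args:',
--     'Attributes:',
--     'Returns:',
--     'Raises:',
--     'Notes:',
--     'Examples:'
-- ]
--
-- SECTION_NAME = 4
--
-- def unindent(lines):
--     try:
--         indent = min(len(line) - len(line.lstrip())
--                      for line in lines if line)
--     except ValueError:
--         return lines
--     else:
--         return [line[indent:] for line in lines]
--
-- def code_block(lines, language=''):
--     return ['```' + language] + lines + ['```']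
--
-- def doctest2md(lines):
--     lines = unindent(lines)
--     is_only_code = all(
--         line.startswith('>>> ') or line.startswith('... ')
--         or line in ['>>>', '...'] for line in lines)
--     if is_only_code:
--         lines = [line[4:] for line in lines]
--     return lines
--
-- def doc_code_block(lines, language):
--     if language == 'python':
--         lines = doctest2md(lines)
--     return code_block(lines, language)
--
-- def make_heading(level, title):
--     return '#'*max(level, 1) + ' ' + title
--
-- def _is_class_section(line):
--     if line.strip() in SECTIONS:
--         return SECTION_NAME
--     return 0
--
-- def _doc2md(lines):
--     # Pass 1: group lines into typed segments.
--     segments = []  # ('code', language, code_lines, terminated) or ('line', line)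
--     i, n = 0, len(lines)
--     while i < n:
--         line = lines[i]
--         t = line.lstrip()
--         if t.startswith('>>> ') or t.startswith('$ '):
--             language = 'python' if t.startswith('>>> ') else 'bash'
--             j = i + 1
--             while j < n and lines[j]:
--                 j += 1
--             terminated = j < n
--             segments.append(('code', language, lines[i:j], terminated))
--             i = j + 1 if terminated else j
--         else:
--             segments.append(('line', line))
--             i += 1
--     # Pass 2: render segments.
--     md = []
--     for seg in segments:
--         if seg[0] == 'code':
--             _, language, code, terminated = seg
--             md += doc_code_block(code, language)
--             if terminated:
--                 md += ['']
--         else: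
--             line = seg[1]
--             level = _is_class_section(line)
--             if level > 0:
--                 md += [make_heading(level, line)]
--             else:
--                 md += [line]
--     return md
-- ===== Notes on version B (the rewrite author's own statement) =====
-- stated objective: alternative
-- what changed: Replaces A's single stateful line loop (is_code/code/language mutable state) by a two-pass design: one pass segments the lines into typed code-block/plain segments (scanning each block to its terminating blank line), and a second pass renders the segments.
import Mathlib
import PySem

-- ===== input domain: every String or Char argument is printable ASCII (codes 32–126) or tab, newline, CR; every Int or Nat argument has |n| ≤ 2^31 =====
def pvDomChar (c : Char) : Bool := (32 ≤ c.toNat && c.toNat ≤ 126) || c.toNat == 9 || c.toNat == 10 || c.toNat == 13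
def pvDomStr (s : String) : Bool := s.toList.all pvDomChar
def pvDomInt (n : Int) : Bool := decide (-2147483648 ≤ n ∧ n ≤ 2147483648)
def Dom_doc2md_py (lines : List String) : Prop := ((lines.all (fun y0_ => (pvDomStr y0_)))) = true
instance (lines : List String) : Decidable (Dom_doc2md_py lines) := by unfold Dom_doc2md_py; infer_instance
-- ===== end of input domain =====

-- B replaces A's single stateful line loop by a segmentation pass plus a rendering pass (same cost, different decomposition); return value only, no mutation involved.

-- shared module helpers (both Pythons call the same module-level helpers)
def pvSECTIONS : List String := ["Args:", "Attributes:", "Returns:", "Raises:", "Notes:", "Examples:"]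

def pvUnindent (lines : List String) : List String :=
  match PySem.List.min?
      ((lines.filter (fun l => l ≠ "")).map
        (fun l => (PySem.Str.len l : Int) - (PySem.Str.len (PySem.Str.lstrip l) : Int)))
      (fun x => x) with
  | none => lines
  | some indent => lines.map (fun l => PySem.Str.slice l (some indent) none)

def pvCodeBlock (lines : List String) (language : String) : List String :=
  [String.ofList ("```".toList ++ language.toList)] ++ lines ++ ["```"]

def pvDoctest2md (lines : List String) : List String :=
  let lines := pvUnindent lines
  let isOnlyCode := lines.all (fun line =>
    PySem.Str.startswith line ">>> " || PySem.Str.startswith line "... " ||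
    line == ">>>" || line == "...")
  if isOnlyCode then lines.map (fun l => PySem.Str.slice l (some 4) none) else lines

def pvDocCodeBlock (lines : List String) (language : String) : List String :=
  pvCodeBlock (if language = "python" then pvDoctest2md lines else lines) language

def pvMakeHeading (level : Int) (title : String) : String :=
  String.ofList (List.replicate (max level 1).toNat '#' ++ " ".toList ++ title.toList)

def pvIsClassSection (line : String) : Int :=
  if pvSECTIONS.contains (PySem.Str.strip line) then 4 else 0

-- ===== PORT A =====
-- loop state: (md, is_code, code, language)
def pvStepA (st : List String × Bool × List String × String) (line : String) :
    List String × Bool × List String × String :=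
  let md := st.1
  let isCode := st.2.1
  let code := st.2.2.1
  let language := st.2.2.2
  let trimmed := PySem.Str.lstrip line
  let level := pvIsClassSection line
  if isCode then
    if line ≠ "" then (md, true, code ++ [line], language)
    else (md ++ pvDocCodeBlock code language ++ [line], false, code, language)
  else if PySem.Str.startswith trimmed ">>> " then (md, true, [line], "python")
  else if PySem.Str.startswith trimmed "$ " then (md, true, [line], "bash")
  else if level > 0 then (md ++ [pvMakeHeading level line], false, code, language)
  else (md ++ [line], false, code, language)

def doc2md_py (lines : List String) : List String :=
  let st := lines.foldl pvStepA ([], false, [], "")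
  if st.2.1 then st.1 ++ pvDocCodeBlock st.2.2.1 st.2.2.2 else st.1

-- ===== PORT B =====
inductive PvSeg where
  | code : String → List String → Bool → PvSeg   -- language, lines, terminated-by-blank-line
  | line : String → PvSeg
deriving DecidableEq, Repr

def pvSegment : List String → List PvSeg
  | [] => []
  | l :: rest =>
    let t := PySem.Str.lstrip l
    if PySem.Str.startswith t ">>> " || PySem.Str.startswith t "$ " then
      let lang := if PySem.Str.startswith t ">>> " then "python" else "bash"
      let taken := rest.takeWhile (fun x => x ≠ "")
      match h : rest.dropWhile (fun x => x ≠ "") with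
      | [] => [PvSeg.code lang (l :: taken) false]
      | _ :: rest' => PvSeg.code lang (l :: taken) true :: pvSegment rest'
    else PvSeg.line l :: pvSegment rest
termination_by ls => ls.length
decreasing_by
  · have h1 := List.length_dropWhile_le (fun x => decide (x ≠ "")) rest
    rw [h] at h1
    simp at h1 ⊢
    omega
  · simp

def pvRenderSeg (seg : PvSeg) : List String :=
  match seg with
  | PvSeg.code language code terminated =>
      pvDocCodeBlock code language ++ (if terminated then [""] else [])
  | PvSeg.line l =>
      let level := pvIsClassSection l
      if level > 0 then [pvMakeHeading level l] else [l]

def doc2md_py_alt (lines : List String) : List String :=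
  (pvSegment lines).foldl (fun md seg => md ++ pvRenderSeg seg) []

-- ===== PRECONDITION & SPEC =====
def Spec_doc2md_py (lines : List String) (out : List String) : Prop := out = doc2md_py_alt lines
instance (lines : List String) (out : List String) : Decidable (Spec_doc2md_py lines out) := by unfold Spec_doc2md_py; infer_instance

-- ===== CLAIM (what is proved, stated in full; the proofs are below) =====
def Claim_equal_doc2md_py : Prop := ∀ (lines : List String), Dom_doc2md_py lines → Spec_doc2md_py lines (doc2md_py lines)

-- ===== LEMMAS AND PROOFS =====

-- A's run, with the final flush of an open code block
def pvRunA (lines : List String) (st : List String × Bool × List String × String) : List String :=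
  let st' := lines.foldl pvStepA st
  if st'.2.1 then st'.1 ++ pvDocCodeBlock st'.2.2.1 st'.2.2.2 else st'.1

theorem pvRunA_cons (l : String) (ls : List String) (st : List String × Bool × List String × String) :
    pvRunA (l :: ls) st = pvRunA ls (pvStepA st l) := rfl

theorem alt_eq_flatMap (ls : List String) :
    doc2md_py_alt ls = (pvSegment ls).flatMap pvRenderSeg := by
  simp [doc2md_py_alt, List.flatMap_def]

theorem pvSegment_cons_line (l : String) (rest : List String)
    (hc : (PySem.Str.startswith (PySem.Str.lstrip l) ">>> " || PySem.Str.startswith (PySem.Str.lstrip l) "$ ") = false) :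
    pvSegment (l :: rest) = PvSeg.line l :: pvSegment rest := by
  rw [pvSegment.eq_def]
  simp only [hc]
  simp

theorem pvSegment_cons_code_nil (l : String) (rest : List String) (lang : String)
    (hc : (PySem.Str.startswith (PySem.Str.lstrip l) ">>> " || PySem.Str.startswith (PySem.Str.lstrip l) "$ ") = true)
    (hlang : (if PySem.Str.startswith (PySem.Str.lstrip l) ">>> " = true then "python" else "bash") = lang)
    (hd : rest.dropWhile (fun x => x ≠ "") = []) :
    pvSegment (l :: rest) = [PvSeg.code lang (l :: rest.takeWhile (fun x => x ≠ "")) false] := by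
  rw [pvSegment.eq_def]
  simp only [hc, if_true]
  split
  · rename_i h
    simp at hlang
    simp [hlang]
  · rename_i h; rw [hd] at h; simp at h

theorem pvSegment_cons_code_cons (l : String) (rest : List String) (lang : String) (e : String) (rest' : List String)
    (hc : (PySem.Str.startswith (PySem.Str.lstrip l) ">>> " || PySem.Str.startswith (PySem.Str.lstrip l) "$ ") = true)
    (hlang : (if PySem.Str.startswith (PySem.Str.lstrip l) ">>> " = true then "python" else "bash") = lang)
    (hd : rest.dropWhile (fun x => x ≠ "") = e :: rest') :
    pvSegment (l :: rest) = PvSeg.code lang (l :: rest.takeWhile (fun x => x ≠ "")) true :: pvSegment rest' := by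
  rw [pvSegment.eq_def]
  simp only [hc, if_true]
  split
  · rename_i h; rw [hd] at h; simp at h
  · rename_i a b h; rw [hd] at h; injection h with h1 h2; subst h2
    simp at hlang
    simp [hlang]

theorem pvRunA_code (ls : List String) : ∀ (md code : List String) (lang : String),
    pvRunA ls (md, true, code, lang) =
      match ls.dropWhile (fun x => x ≠ "") with
      | [] => md ++ pvDocCodeBlock (code ++ ls.takeWhile (fun x => x ≠ "")) lang
      | _ :: rest =>
          pvRunA rest
            (md ++ pvDocCodeBlock (code ++ ls.takeWhile (fun x => x ≠ "")) lang ++ [""],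
             false, code ++ ls.takeWhile (fun x => x ≠ ""), lang) := by
  induction ls with
  | nil => intro md code lang; simp [pvRunA]
  | cons l ls ih =>
    intro md code lang
    rw [pvRunA_cons]
    by_cases hl : l = ""
    · subst hl
      simp [pvStepA]
    · have hstep : pvStepA (md, true, code, lang) l = (md, true, code ++ [l], lang) := by
        simp [pvStepA, hl]
      rw [hstep, ih]
      simp [hl]

theorem pvRunA_noncode (n : Nat) : ∀ (ls : List String), ls.length ≤ n →
    ∀ (md c : List String) (g : String),
    pvRunA ls (md, false, c, g) = md ++ doc2md_py_alt ls := by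
  induction n with
  | zero =>
    intro ls hls md c g
    have : ls = [] := List.eq_nil_of_length_eq_zero (Nat.le_zero.mp hls)
    subst this
    simp [pvRunA, doc2md_py_alt, pvSegment]
  | succ m ih =>
    intro ls hls md c g
    cases ls with
    | nil => simp [pvRunA, doc2md_py_alt, pvSegment]
    | cons l rest =>
      have hrest : rest.length ≤ m := by simpa using hls
      rw [pvRunA_cons]
      by_cases hpy : PySem.Str.startswith (PySem.Str.lstrip l) ">>> " = true
      · have hpy' := hpy
        simp at hpy'
        have hc : (PySem.Str.startswith (PySem.Str.lstrip l) ">>> " || PySem.Str.startswith (PySem.Str.lstrip l) "$ ") = true := by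
          simp [hpy']
        have hlang : (if PySem.Str.startswith (PySem.Str.lstrip l) ">>> " = true then "python" else "bash") = "python" := by
          simp [hpy']
        have hstep : pvStepA (md, false, c, g) l = (md, true, [l], "python") := by
          simp [pvStepA, hpy']
        rw [hstep, pvRunA_code]
        cases hd : rest.dropWhile (fun x => x ≠ "") with
        | nil =>
          rw [alt_eq_flatMap, pvSegment_cons_code_nil l rest "python" hc hlang hd]
          simp [pvRenderSeg]
        | cons e rest' =>
          have hr' : rest'.length ≤ m := by
            have h1 := List.length_dropWhile_le (fun x => decide (x ≠ "")) rest
            rw [hd] at h1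
            simp at h1
            omega
          rw [alt_eq_flatMap, pvSegment_cons_code_cons l rest "python" e rest' hc hlang hd]
          simp [pvRenderSeg, ih rest' hr', alt_eq_flatMap]
      · by_cases hsh : PySem.Str.startswith (PySem.Str.lstrip l) "$ " = true
        · have hpy' := hpy
          simp at hpy'
          have hsh' := hsh
          simp at hsh'
          have hc : (PySem.Str.startswith (PySem.Str.lstrip l) ">>> " || PySem.Str.startswith (PySem.Str.lstrip l) "$ ") = true := by
            simp [hsh']
          have hlang : (if PySem.Str.startswith (PySem.Str.lstrip l) ">>> " = true then "python" else "bash") = "bash" := by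
            simp [hpy']
          have hstep : pvStepA (md, false, c, g) l = (md, true, [l], "bash") := by
            simp [pvStepA, hpy', hsh']
          rw [hstep, pvRunA_code]
          cases hd : rest.dropWhile (fun x => x ≠ "") with
          | nil =>
            rw [alt_eq_flatMap, pvSegment_cons_code_nil l rest "bash" hc hlang hd]
            simp [pvRenderSeg]
          | cons e rest' =>
            have hr' : rest'.length ≤ m := by
              have h1 := List.length_dropWhile_le (fun x => decide (x ≠ "")) rest
              rw [hd] at h1
              simp at h1
              omega
            rw [alt_eq_flatMap, pvSegment_cons_code_cons l rest "bash" e rest' hc hlang hd]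
            simp [pvRenderSeg, ih rest' hr', alt_eq_flatMap]
        · have hpy' := hpy
          simp at hpy'
          have hsh' := hsh
          simp at hsh'
          have hc : (PySem.Str.startswith (PySem.Str.lstrip l) ">>> " || PySem.Str.startswith (PySem.Str.lstrip l) "$ ") = false := by
            simp [hpy', hsh']
          by_cases hlev : pvIsClassSection l > 0
          · have hstep : pvStepA (md, false, c, g) l =
                (md ++ [pvMakeHeading (pvIsClassSection l) l], false, c, g) := by
              simp [pvStepA, hpy', hsh', hlev]
            rw [hstep, alt_eq_flatMap (l :: rest), pvSegment_cons_line l rest hc, ih rest hrest]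
            simp [pvRenderSeg, hlev, alt_eq_flatMap]
          · have hstep : pvStepA (md, false, c, g) l = (md ++ [l], false, c, g) := by
              simp [pvStepA, hpy', hsh', hlev]
            rw [hstep, alt_eq_flatMap (l :: rest), pvSegment_cons_line l rest hc, ih rest hrest]
            simp [pvRenderSeg, hlev, alt_eq_flatMap]

-- ===== VERDICT (by name: the statement is the Claim_ definition above) =====
theorem doc2md_py_spec : Claim_equal_doc2md_py := by
  intro lines _
  unfold Spec_doc2md_py
  have h := pvRunA_noncode lines.length lines (le_refl _) [] [] ""
  simpa [pvRunA, doc2md_py] using h
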